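-- pv_equiv track=rewrite | github.com/mauriciodileo87/Reporte-Facturacion-CC | backend/core/planilla_area_recaudacion.py | _mapear_filas_por_sorteo
-- ===== SOURCE A (Python) =====
-- def _mapear_filas_por_sorteo(filas: list[list[str]] | None, cols_len: int) -> tuple[dict[int, list[str]], list[int]]:
--     filas_por_sorteo: dict[int, list[str]] = {}
--     orden: list[int] = []
--
--     for fila in filas or []:
--         if not isinstance(fila, list) or not fila:
--             continue
--         try:
--             sorteo = int(str(fila[0]).strip())
--         except Exception:
--             continue
--
--         row = [str(v) for v in fila]
--         if len(row) < cols_len: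
--             row.extend([""] * (cols_len - len(row)))
--         row = row[:cols_len]
--         filas_por_sorteo[sorteo] = row
--         if sorteo not in orden:
--             orden.append(sorteo)
--
--     return filas_por_sorteo, orden
-- ===== SOURCE B (Python) =====
-- def _mapear_filas_por_sorteo(filas, cols_len):
--     # Stage 1: parse/normalise every usable row into a flat (sorteo, row) pair list.
--     pairs = []
--     for fila in filas or []:
--         if not isinstance(fila, list) or not fila:
--             continue
--         try:
--             s = int(str(fila[0]).strip())
--         except Exception:
--             continue
--         row = [str(v) for v in fila][:cols_len]
--         row += [""] * (cols_len - len(row))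
--         pairs.append((s, row))
--     # Stage 2: first-seen order of the ids.
--     orden = list(dict.fromkeys(s for s, _ in pairs))
--     # Stage 3: walk the pairs backwards, keeping the first hit per id (= last occurrence),
--     # so no entry is ever overwritten.
--     last = {}
--     for s, r in reversed(pairs):
--         if s not in last:
--             last[s] = r
--     # Stage 4: reassemble in first-seen order (every id in orden is a key of last).
--     return {s: last[s] for s in orden}, orden
-- ===== Notes on version B (the rewrite author's own statement) =====
-- stated objective: alternative
-- what changed: B replaces A's single stateful pass (dict with overwrites plus an O(n) membership-scanned orden list) by four staged passes: parse rows into a flat pair list, dedup its keys for first-seen order, a reverse pass that keeps the first hit per id so nothing is ever overwritten, then reassemble the dict in that order.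
import Mathlib
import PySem

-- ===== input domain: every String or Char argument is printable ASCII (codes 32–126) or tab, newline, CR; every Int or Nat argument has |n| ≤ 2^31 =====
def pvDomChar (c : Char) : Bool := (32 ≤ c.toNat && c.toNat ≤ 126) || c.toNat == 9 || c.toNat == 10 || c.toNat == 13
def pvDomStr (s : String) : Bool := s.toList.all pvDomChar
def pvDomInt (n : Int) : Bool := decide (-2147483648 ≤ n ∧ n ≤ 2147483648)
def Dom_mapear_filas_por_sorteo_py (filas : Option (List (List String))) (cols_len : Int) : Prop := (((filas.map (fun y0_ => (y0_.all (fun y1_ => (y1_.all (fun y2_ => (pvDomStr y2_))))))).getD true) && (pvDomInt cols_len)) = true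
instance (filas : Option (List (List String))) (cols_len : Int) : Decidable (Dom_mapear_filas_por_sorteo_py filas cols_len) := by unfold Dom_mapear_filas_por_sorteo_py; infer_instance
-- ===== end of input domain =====

-- B rebuilds A's result by staged passes (parse to pairs, dedup keys for order, reverse pass keeping
-- the first hit per id, reassemble) instead of A's single overwrite-pass; proved equal everywhere.


-- ===== PORT A =====
-- one row of A's loop body: skip empty rows and unparsable first cells; pad then truncate; store and track order
def pvStepA (cols_len : Int) (st : PySem.Dict Int (List String) × List Int) (fila : List String) :
    PySem.Dict Int (List String) × List Int :=
  match fila with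
  | [] => st                                   -- 'if not fila: continue'
  | v0 :: _ =>
    match PySem.Int.ofStr? (PySem.Str.strip v0) with   -- int(str(fila[0]).strip()); str of a str is the identity
    | none => st                                -- 'except Exception: continue'
    | some sorteo =>
      let row := fila.map (fun v => v)          -- [str(v) for v in fila]; str on str is identity
      let row := if (row.length : Int) < cols_len
                 then row ++ List.replicate (cols_len - (row.length : Int)).toNat ""
                 else row                       -- row.extend([""] * (cols_len - len(row)))
      let row := PySem.List.slice row none (some cols_len)   -- row[:cols_len]
      (st.1.insert sorteo row,
       if sorteo ∈ st.2 then st.2 else st.2 ++ [sorteo])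

def mapear_filas_por_sorteo_py (filas : Option (List (List String))) (cols_len : Int) : (List (Int × List String)) × List Int :=
  let st := (filas.getD []).foldl (pvStepA cols_len) (PySem.Dict.empty, [])
  (st.1.items, st.2)

-- ===== PORT B =====
-- Stage 1 of B: parse one row to its (sorteo, normalised-row) pair, or none if the row is skipped
def pvParse (cols_len : Int) (fila : List String) : Option (Int × List String) :=
  match fila with
  | [] => none
  | v0 :: _ =>
    match PySem.Int.ofStr? (PySem.Str.strip v0) with
    | none => none
    | some s =>
      let row := PySem.List.slice (fila.map (fun v => v)) none (some cols_len)   -- [str(v) for v in fila][:cols_len]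
      some (s, row ++ List.replicate (cols_len - (row.length : Int)).toNat "")   -- row += [""] * (cols_len - len(row))

def mapear_filas_por_sorteo_py_alt (filas : Option (List (List String))) (cols_len : Int) : (List (Int × List String)) × List Int :=
  let pairs := (filas.getD []).filterMap (pvParse cols_len)          -- the parse loop with continue/append
  let orden := PySem.List.dedup (pairs.map Prod.fst)                 -- list(dict.fromkeys(s for s, _ in pairs))
  let last := pairs.reverse.foldl                                     -- for s, r in reversed(pairs): if s not in last: last[s] = r
    (fun d p => if d.contains p.1 then d else d.insert p.1 p.2) PySem.Dict.empty
  let final := orden.foldl (fun d s => d.insert s (last.getD s [])) PySem.Dict.empty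
    -- {s: last[s] for s in orden}; every s in orden is a key of last, so the lookup never fails (getD default unreachable)
  (final.items, orden)

-- ===== PRECONDITION & SPEC =====
def Spec_mapear_filas_por_sorteo_py (filas : Option (List (List String))) (cols_len : Int) (out : (List (Int × List String)) × List Int) : Prop := out = mapear_filas_por_sorteo_py_alt filas cols_len
instance (filas : Option (List (List String))) (cols_len : Int) (out : (List (Int × List String)) × List Int) : Decidable (Spec_mapear_filas_por_sorteo_py filas cols_len out) := by unfold Spec_mapear_filas_por_sorteo_py; infer_instance

-- ===== CLAIM =====
def Claim_equal_mapear_filas_por_sorteo_py : Prop := ∀ (filas : Option (List (List String))) (cols_len : Int), Dom_mapear_filas_por_sorteo_py filas cols_len → Spec_mapear_filas_por_sorteo_py filas cols_len (mapear_filas_por_sorteo_py filas cols_len)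

-- ===== LEMMAS AND PROOFS =====

theorem pv_rowEq (c : Int) (l : List String) :
    PySem.List.slice (if (l.length : Int) < c then l ++ List.replicate (c - (l.length : Int)).toNat "" else l) none (some c)
      = PySem.List.slice l none (some c)
        ++ List.replicate (c - ((PySem.List.slice l none (some c)).length : Int)).toNat "" := by
  by_cases hc : 0 ≤ c
  · rw [PySem.List.slice_to _ hc, PySem.List.slice_to _ hc]
    by_cases hlt : (l.length : Int) < c
    · rw [if_pos hlt]
      rw [List.take_of_length_le (by simp; omega), List.take_of_length_le (by omega)]
    · rw [if_neg hlt]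
      have h2 : (l.take c.toNat).length = c.toNat := by simp; omega
      rw [h2]
      have h0 : (c - (c.toNat : Int)).toNat = 0 := by omega
      rw [h0]
      simp
  · have hlt : ¬ (l.length : Int) < c := by omega
    rw [if_neg hlt]
    have h0 : (c - ((PySem.List.slice l none (some c)).length : Int)).toNat = 0 := by omega
    rw [h0]
    simp

theorem pv_foldA_eq (c : Int) (rows : List (List String)) (st : PySem.Dict Int (List String) × List Int) :
    rows.foldl (pvStepA c) st
      = (rows.filterMap (pvParse c)).foldl
          (fun st p => (st.1.insert p.1 p.2, if p.1 ∈ st.2 then st.2 else st.2 ++ [p.1])) st := by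
  induction rows generalizing st with
  | nil => rfl
  | cons fila rest ih =>
    cases fila with
    | nil =>
      have h1 : pvStepA c st [] = st := rfl
      have h2 : pvParse c ([] : List String) = none := rfl
      rw [List.foldl_cons, List.filterMap_cons, h1, h2]
      exact ih st
    | cons v0 vs =>
      cases hp : PySem.Int.ofStr? (PySem.Str.strip v0) with
      | none =>
        have hP : pvParse c (v0 :: vs) = none := by simp only [pvParse, hp]
        have hS : pvStepA c st (v0 :: vs) = st := by simp only [pvStepA, hp]
        rw [List.foldl_cons, List.filterMap_cons, hP, hS]
        exact ih st
      | some s =>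
        have hP : pvParse c (v0 :: vs) = some (s,
            PySem.List.slice ((v0 :: vs).map (fun v => v)) none (some c)
              ++ List.replicate (c - ((PySem.List.slice ((v0 :: vs).map (fun v => v)) none (some c)).length : Int)).toNat "") := by
          simp only [pvParse, hp]
        have hS : pvStepA c st (v0 :: vs) = (st.1.insert s
            (PySem.List.slice ((v0 :: vs).map (fun v => v)) none (some c)
              ++ List.replicate (c - ((PySem.List.slice ((v0 :: vs).map (fun v => v)) none (some c)).length : Int)).toNat ""),
            if s ∈ st.2 then st.2 else st.2 ++ [s]) := by
          simp only [pvStepA, hp]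
          rw [pv_rowEq c ((v0 :: vs).map (fun v => v))]
        rw [List.foldl_cons, List.filterMap_cons, hP, hS]
        exact ih _

theorem pv_fold_split (pairs : List (Int × List String)) (d : PySem.Dict Int (List String)) (o : List Int) :
    pairs.foldl (fun st p => (st.1.insert p.1 p.2, if p.1 ∈ st.2 then st.2 else st.2 ++ [p.1])) (d, o)
      = (pairs.foldl (fun d p => d.insert p.1 p.2) d,
         pairs.foldl (fun o p => if p.1 ∈ o then o else o ++ [p.1]) o) := by
  induction pairs generalizing d o with
  | nil => rfl
  | cons p rest ih => simpa using ih (d.insert p.1 p.2) (if p.1 ∈ o then o else o ++ [p.1])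

theorem pv_orden_eq (ks : List Int) (o : List Int) :
    ks.foldl (fun o s => if s ∈ o then o else o ++ [s]) o = PySem.Set.update o ks := by
  induction ks generalizing o with
  | nil => simp [PySem.Set.update_nil]
  | cons k rest ih =>
    rw [List.foldl_cons, PySem.Set.update_cons, ih]
    congr 1
    by_cases h : k ∈ o <;> simp [PySem.Set.add, h]

theorem pv_getA (l : List (Int × List String)) (d : PySem.Dict Int (List String)) (s : Int) :
    (l.foldl (fun d p => d.insert p.1 p.2) d).get? s
      = ((l.reverse.find? (fun p => p.1 == s)).map Prod.snd).or (d.get? s) := by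
  induction l generalizing d with
  | nil => simp
  | cons p rest ih =>
    rw [List.foldl_cons, ih, List.reverse_cons, List.find?_append, Option.map_or, Option.or_assoc]
    congr 1
    by_cases h : p.1 = s
    · simp [List.find?, h, Option.or]
    · have hb : (p.1 == s) = false := by simpa using h
      simp [List.find?, hb, PySem.Dict.get?_insert, Ne.symm h]

theorem pv_getB (m : List (Int × List String)) (d : PySem.Dict Int (List String)) (s : Int) :
    (m.foldl (fun d p => if d.contains p.1 then d else d.insert p.1 p.2) d).get? s
      = (d.get? s).or ((m.find? (fun p => p.1 == s)).map Prod.snd) := by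
  induction m generalizing d with
  | nil => simp
  | cons p rest ih =>
    rw [List.foldl_cons]
    by_cases hc : d.contains p.1
    · rw [if_pos hc, ih]
      by_cases h : p.1 = s
      · subst h
        have hs : (d.get? p.1).isSome := by rw [← PySem.Dict.contains_eq_isSome_get?]; exact hc
        obtain ⟨v, hg⟩ := Option.isSome_iff_exists.mp hs
        rw [hg]
        simp
      · have hb : (p.1 == s) = false := by simpa using h
        simp [hb]
    · rw [if_neg hc, ih]
      have hnone : d.get? p.1 = none := (PySem.Dict.get?_eq_none_iff_contains d p.1).mpr (by simpa using hc)
      by_cases h : p.1 = s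
      · subst h
        rw [PySem.Dict.get?_insert, if_pos rfl, hnone]
        simp
      · have hb : (p.1 == s) = false := by simpa using h
        rw [PySem.Dict.get?_insert, if_neg (fun hs => h hs.symm)]
        simp [hb]

theorem pv_main (filas : Option (List (List String))) (c : Int) :
    (let st := (filas.getD []).foldl (pvStepA c) (PySem.Dict.empty, [])
     ((st.1.items, st.2) : (List (Int × List String)) × List Int))
      = (let pairs := (filas.getD []).filterMap (pvParse c)
         let orden := PySem.List.dedup (pairs.map Prod.fst)
         let last := pairs.reverse.foldl
           (fun d p => if d.contains p.1 then d else d.insert p.1 p.2) PySem.Dict.empty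
         let final := orden.foldl (fun d s => d.insert s (last.getD s [])) PySem.Dict.empty
         (final.items, orden)) := by
  simp only []
  set pairs := (filas.getD []).filterMap (pvParse c) with hpairs
  rw [pv_foldA_eq, ← hpairs, pv_fold_split]
  set dA := pairs.foldl (fun d p => d.insert p.1 p.2) PySem.Dict.empty with hdA
  set last := pairs.reverse.foldl (fun d p => if d.contains p.1 then d else d.insert p.1 p.2) PySem.Dict.empty with hlast
  have horden : pairs.foldl (fun o p => if p.1 ∈ o then o else o ++ [p.1]) ([] : List Int)
      = PySem.List.dedup (pairs.map Prod.fst) := by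
    rw [← List.foldl_map (f := Prod.fst) (g := fun (o : List Int) (s : Int) => if s ∈ o then o else o ++ [s])]
    rw [pv_orden_eq, PySem.List.dedup_eq_ofList, PySem.Set.update_nil_left]
  have hget : ∀ s, dA.get? s = last.get? s := by
    intro s
    rw [hdA, hlast, pv_getA, pv_getB]
    simp [PySem.Dict.get?_empty]
  have hkeys : dA.keys = PySem.List.dedup (pairs.map Prod.fst) := by
    rw [hdA, PySem.Dict.keys_foldl_insert_key pairs Prod.fst (fun _ p => p.2) PySem.Dict.empty,
      PySem.Dict.keys_empty, PySem.Set.update_nil_left, PySem.List.dedup_eq_ofList]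
  have hnodup : dA.keys.Nodup := by
    rw [hkeys, PySem.List.dedup_eq_ofList]; exact PySem.Set.nodup_ofList _
  have hfinal : ((PySem.List.dedup (pairs.map Prod.fst)).foldl
      (fun d s => d.insert s (last.getD s [])) PySem.Dict.empty).items
      = (PySem.List.dedup (pairs.map Prod.fst)).map (fun s => (s, last.getD s [])) := by
    have hnd : ((PySem.List.dedup (pairs.map Prod.fst)).map (fun s : Int => s)).Nodup := by
      simpa [PySem.List.dedup_eq_ofList] using PySem.Set.nodup_ofList (pairs.map Prod.fst)
    have h := PySem.Dict.items_foldl_insert_fresh (PySem.List.dedup (pairs.map Prod.fst)) (fun s : Int => s)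
      (fun s => last.getD s []) PySem.Dict.empty (fun a _ => PySem.Dict.contains_empty _) hnd
    simpa using h
  rw [horden, hfinal, PySem.Dict.items_eq_map_keys dA hnodup []]
  rw [hkeys]
  refine congrArg (fun l => (l, PySem.List.dedup (pairs.map Prod.fst))) ?_
  apply List.map_congr_left
  intro s _
  rw [PySem.Dict.getD_eq_get?_getD, PySem.Dict.getD_eq_get?_getD, hget]

-- ===== VERDICT =====
theorem mapear_filas_por_sorteo_py_spec : Claim_equal_mapear_filas_por_sorteo_py := by
  intro filas cols_len _
  unfold Spec_mapear_filas_por_sorteo_py mapear_filas_por_sorteo_py mapear_filas_por_sorteo_py_alt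
  exact pv_main filas cols_len
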